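-- pv_equiv track=rewrite | github.com/ilastik/hytra | hytra/core/jsongraph.py | getMergersPerTimestep
-- ===== SOURCE A (Python) =====
-- def getMergersPerTimestep(mergers, timesteps):
--     """ returns mergersPerTimestep = { "<timestep>": {<idx>: <count>, <idx>: <count>, ...}, "<timestep>": {...}, ... } """
--
--     """
--     TODO: We're storing all the mergers in a dict in order to increase speed at the expense of efficiency.
--     This could certainly be done faster and memory-efficient if we just return the merger dict for all times, without using the timestep loop.
--     """
--
--     mergersDict = {}
--     for time, tid, count in mergers:
--         time = str(time)
--         if time in mergersDict:
--             mergersDict[time][tid] = count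
--         else:
--             mergersDict[time] = {}
--             mergersDict[time][tid] = count
--
--     mergersPerTimestep = {}
--     for time in timesteps:
--         if time in mergersDict:
--             mergersPerTimestep[time] = mergersDict[time]
--         else:
--             mergersPerTimestep[time] = {}
--
--     return mergersPerTimestep
-- ===== SOURCE B (Python) =====
-- def getMergersPerTimestep(mergers, timesteps):
--     """ returns mergersPerTimestep = { "<timestep>": {<idx>: <count>, ...}, ... } """
--     # single guarded pass over mergers into a pre-allocated per-timestep table
--     result = {t: {} for t in timesteps}
--     allowed = set(timesteps)
--     for time, tid, count in mergers:
--         time = str(time)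
--         if time in allowed:
--             result[time][tid] = count
--     return result
-- ===== Notes on version B (the rewrite author's own statement) =====
-- stated objective: simpler
-- what changed: B pre-allocates the per-timestep result dict and fills it in one guarded pass over mergers, instead of A's two passes that first group ALL mergers by time (also for times outside timesteps) and then copy the requested groups.
import Mathlib
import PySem

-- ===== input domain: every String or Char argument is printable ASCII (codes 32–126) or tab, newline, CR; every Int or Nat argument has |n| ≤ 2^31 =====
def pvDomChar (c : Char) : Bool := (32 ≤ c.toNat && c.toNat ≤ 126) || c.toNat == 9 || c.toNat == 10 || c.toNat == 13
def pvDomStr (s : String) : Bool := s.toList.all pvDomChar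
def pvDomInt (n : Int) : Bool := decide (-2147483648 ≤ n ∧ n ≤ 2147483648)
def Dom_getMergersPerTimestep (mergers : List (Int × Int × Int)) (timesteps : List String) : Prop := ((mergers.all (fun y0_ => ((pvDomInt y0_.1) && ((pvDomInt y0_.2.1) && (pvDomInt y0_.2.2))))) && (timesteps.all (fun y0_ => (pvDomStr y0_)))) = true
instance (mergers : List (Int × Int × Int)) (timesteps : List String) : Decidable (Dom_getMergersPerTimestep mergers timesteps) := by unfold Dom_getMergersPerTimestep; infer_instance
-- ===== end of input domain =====

-- B pre-allocates the result table and fills it in one guarded pass over mergers (simpler; A does two passes and groups all times first).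

-- ===== PORT A =====
def getMergersPerTimestep (mergers : List (Int × Int × Int)) (timesteps : List String) : List (String × List (Int × Int)) :=
  let mergersDict : PySem.Dict String (PySem.Dict Int Int) :=
    mergers.foldl (fun d m =>
      let time := PySem.Int.toStr m.1
      if d.contains time then
        d.insert time ((d.getD time PySem.Dict.empty).insert m.2.1 m.2.2)
      else
        d.insert time (PySem.Dict.empty.insert m.2.1 m.2.2)) PySem.Dict.empty
  let mergersPerTimestep : PySem.Dict String (PySem.Dict Int Int) :=
    timesteps.foldl (fun r time =>
      if mergersDict.contains time then r.insert time (mergersDict.getD time PySem.Dict.empty)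
      else r.insert time PySem.Dict.empty) PySem.Dict.empty
  mergersPerTimestep.items.map (fun p => (p.1, p.2.items))

-- ===== PORT B =====
def getMergersPerTimestep_alt (mergers : List (Int × Int × Int)) (timesteps : List String) : List (String × List (Int × Int)) :=
  let result0 : PySem.Dict String (PySem.Dict Int Int) :=
    timesteps.foldl (fun r t => r.insert t PySem.Dict.empty) PySem.Dict.empty
  let allowed : PySem.Set String := PySem.Set.ofList timesteps
  let result : PySem.Dict String (PySem.Dict Int Int) :=
    mergers.foldl (fun r m =>
      let time := PySem.Int.toStr m.1
      if PySem.Set.contains allowed time then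
        r.insert time ((r.getD time PySem.Dict.empty).insert m.2.1 m.2.2)
      else r) result0
  result.items.map (fun p => (p.1, p.2.items))

-- ===== PRECONDITION & SPEC =====
def Spec_getMergersPerTimestep (mergers : List (Int × Int × Int)) (timesteps : List String) (out : List (String × List (Int × Int))) : Prop := out = getMergersPerTimestep_alt mergers timesteps
instance (mergers : List (Int × Int × Int)) (timesteps : List String) (out : List (String × List (Int × Int))) : Decidable (Spec_getMergersPerTimestep mergers timesteps out) := by unfold Spec_getMergersPerTimestep; infer_instance

-- ===== CLAIM (what is proved, stated in full; the proofs are below) =====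
def Claim_equal_getMergersPerTimestep : Prop := ∀ (mergers : List (Int × Int × Int)) (timesteps : List String), Dom_getMergersPerTimestep mergers timesteps → Spec_getMergersPerTimestep mergers timesteps (getMergersPerTimestep mergers timesteps)

-- ===== LEMMAS AND PROOFS =====

-- the per-timestep group a time t accumulates from a merger list
def innerOf (l : List (Int × Int × Int)) (t : String) : PySem.Dict Int Int :=
  (l.filter (fun m => PySem.Int.toStr m.1 == t)).foldl
    (fun inner m => inner.insert m.2.1 m.2.2) PySem.Dict.empty

theorem innerOf_append_singleton (l : List (Int × Int × Int)) (m : Int × Int × Int) (t : String) :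
    innerOf (l ++ [m]) t =
      if PySem.Int.toStr m.1 = t then (innerOf l t).insert m.2.1 m.2.2 else innerOf l t := by
  simp only [innerOf, List.filter_append]
  by_cases h : PySem.Int.toStr m.1 = t <;> simp [h]

-- A's first loop: the value grouped under a key t
theorem getD_mdFold (l : List (Int × Int × Int)) (t : String) :
    (l.foldl (fun d m =>
      let time := PySem.Int.toStr m.1
      if d.contains time then
        d.insert time ((d.getD time PySem.Dict.empty).insert m.2.1 m.2.2)
      else
        d.insert time (PySem.Dict.empty.insert m.2.1 m.2.2)) PySem.Dict.empty).getD t PySem.Dict.empty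
    = innerOf l t := by
  induction l using List.reverseRecOn with
  | nil => simp [innerOf]
  | append_singleton l m ih =>
    rw [List.foldl_append, innerOf_append_singleton]
    simp only [List.foldl_cons, List.foldl_nil]
    set d := l.foldl (fun d m =>
      let time := PySem.Int.toStr m.1
      if d.contains time then
        d.insert time ((d.getD time PySem.Dict.empty).insert m.2.1 m.2.2)
      else
        d.insert time (PySem.Dict.empty.insert m.2.1 m.2.2)) PySem.Dict.empty with hd
    by_cases hc : d.contains (PySem.Int.toStr m.1)
    · simp only [hc, if_true]
      rw [PySem.Dict.getD_insert]
      by_cases ht : t = PySem.Int.toStr m.1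
      · subst ht; simp [ih]
      · simp [ht, Ne.symm ht, ih]
    · rw [Bool.not_eq_true] at hc
      simp only [hc, Bool.false_eq_true, if_false]
      rw [PySem.Dict.getD_insert]
      by_cases ht : t = PySem.Int.toStr m.1
      · subst ht
        simp [ih.symm, PySem.Dict.getD_of_not_contains _ _ hc]
      · simp [ht, Ne.symm ht, ih]

-- a fold that inserts t ↦ g t for each t of a key list builds exactly the deduped table
theorem items_foldl_insert_fun (l : List String) (g : String → PySem.Dict Int Int) :
    (l.foldl (fun r t => r.insert t (g t)) PySem.Dict.empty).items
      = (PySem.Set.ofList l).map (fun t => (t, g t)) := by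
  induction l using List.reverseRecOn with
  | nil => simp only [List.foldl_nil, PySem.Set.ofList_nil, List.map_nil]; rfl
  | append_singleton l t ih =>
    rw [List.foldl_append, PySem.Set.ofList_append_singleton]
    simp only [List.foldl_cons, List.foldl_nil]
    set d := l.foldl (fun r t => r.insert t (g t)) PySem.Dict.empty with hd
    have hkeys : d.keys = PySem.Set.ofList l := by
      simp [PySem.Dict.keys, ih, List.map_map, Function.comp_def]
    by_cases hm : t ∈ PySem.Set.ofList l
    · have hc : d.contains t = true := by
        rw [PySem.Dict.contains_iff_mem_keys, hkeys]; exact hm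
      rw [PySem.Dict.items_insert_of_contains _ _ hc, PySem.Set.add_of_mem hm, ih,
        List.map_map]
      apply List.map_congr_left
      intro s _
      by_cases hs : s = t <;> simp [hs]
    · have hc : d.contains t = false := by
        rw [Bool.eq_false_iff, Ne, PySem.Dict.contains_iff_mem_keys, hkeys]; exact hm
      rw [PySem.Dict.items_insert_of_not_contains _ _ hc, PySem.Set.add_of_not_mem hm, ih,
        List.map_append]
      simp

-- B's merger loop keeps the table shape and grows exactly the admitted groups
theorem items_bFold (timesteps : List String) (l : List (Int × Int × Int)) :
    (l.foldl (fun r m =>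
        let time := PySem.Int.toStr m.1
        if PySem.Set.contains (PySem.Set.ofList timesteps) time then
          r.insert time ((r.getD time PySem.Dict.empty).insert m.2.1 m.2.2)
        else r)
      (timesteps.foldl (fun r t => r.insert t PySem.Dict.empty) PySem.Dict.empty)).items
    = (PySem.Set.ofList timesteps).map (fun t => (t, innerOf l t)) := by
  induction l using List.reverseRecOn with
  | nil =>
    rw [List.foldl_nil, items_foldl_insert_fun]
    apply List.map_congr_left
    intro s _; simp [innerOf]
  | append_singleton l m ih =>
    rw [List.foldl_append]
    simp only [List.foldl_cons, List.foldl_nil]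
    set d := l.foldl (fun r m =>
        let time := PySem.Int.toStr m.1
        if PySem.Set.contains (PySem.Set.ofList timesteps) time then
          r.insert time ((r.getD time PySem.Dict.empty).insert m.2.1 m.2.2)
        else r)
      (timesteps.foldl (fun r t => r.insert t PySem.Dict.empty) PySem.Dict.empty) with hd
    have hkeys : d.keys = PySem.Set.ofList timesteps := by
      simp [PySem.Dict.keys, ih, List.map_map, Function.comp_def]
    by_cases hg : PySem.Int.toStr m.1 ∈ PySem.Set.ofList timesteps
    · have hgc : PySem.Set.contains (PySem.Set.ofList timesteps) (PySem.Int.toStr m.1) = true := by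
        rw [PySem.Set.contains_iff]; exact hg
      have hc : d.contains (PySem.Int.toStr m.1) = true := by
        rw [PySem.Dict.contains_iff_mem_keys, hkeys]; exact hg
      have hnodup : d.keys.Nodup := by rw [hkeys]; exact PySem.Set.nodup_ofList _
      have hmemitems : (PySem.Int.toStr m.1, innerOf l (PySem.Int.toStr m.1)) ∈ d.items := by
        rw [ih]; exact List.mem_map.mpr ⟨PySem.Int.toStr m.1, hg, rfl⟩
      have hget : d.getD (PySem.Int.toStr m.1) PySem.Dict.empty = innerOf l (PySem.Int.toStr m.1) :=
        PySem.Dict.getD_of_mem_items _ hmemitems hnodup _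
      simp only [hgc, if_true]
      rw [PySem.Dict.items_insert_of_contains _ _ hc, ih, List.map_map]
      apply List.map_congr_left
      intro s _
      rw [innerOf_append_singleton]
      by_cases hs : s = PySem.Int.toStr m.1
      · subst hs; simp [hget]
      · simp [hs, Ne.symm hs]
    · have hgc : PySem.Set.contains (PySem.Set.ofList timesteps) (PySem.Int.toStr m.1) = false := by
        rw [Bool.eq_false_iff, Ne, PySem.Set.contains_iff]; exact hg
      simp only [hgc, Bool.false_eq_true, if_false]
      rw [ih]
      apply List.map_congr_left
      intro s hsS
      rw [innerOf_append_singleton]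
      have : PySem.Int.toStr m.1 ≠ s := fun h => hg (h ▸ hsS)
      simp [this]

-- A's second loop both branches insert mergersDict.getD time empty
theorem stepA2_eq (md : PySem.Dict String (PySem.Dict Int Int))
    (r : PySem.Dict String (PySem.Dict Int Int)) (t : String) :
    (if md.contains t then r.insert t (md.getD t PySem.Dict.empty)
     else r.insert t PySem.Dict.empty)
    = r.insert t (md.getD t PySem.Dict.empty) := by
  by_cases h : md.contains t
  · simp [h]
  · simp [h, PySem.Dict.getD_of_not_contains _ _ (by simpa using h)]

-- ===== VERDICT (by name: the statement is the Claim_ definition above) =====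
theorem getMergersPerTimestep_spec : Claim_equal_getMergersPerTimestep := by
  intro mergers timesteps _
  unfold Spec_getMergersPerTimestep getMergersPerTimestep getMergersPerTimestep_alt
  simp only []
  congr 1
  have hA : (timesteps.foldl (fun r time =>
      if (mergers.foldl (fun d m =>
          let time := PySem.Int.toStr m.1
          if d.contains time then
            d.insert time ((d.getD time PySem.Dict.empty).insert m.2.1 m.2.2)
          else
            d.insert time (PySem.Dict.empty.insert m.2.1 m.2.2)) PySem.Dict.empty).contains time
      then r.insert time ((mergers.foldl (fun d m =>
          let time := PySem.Int.toStr m.1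
          if d.contains time then
            d.insert time ((d.getD time PySem.Dict.empty).insert m.2.1 m.2.2)
          else
            d.insert time (PySem.Dict.empty.insert m.2.1 m.2.2)) PySem.Dict.empty).getD time PySem.Dict.empty)
      else r.insert time PySem.Dict.empty) PySem.Dict.empty).items
      = (PySem.Set.ofList timesteps).map (fun t => (t, innerOf mergers t)) := by
    have hsteps : ∀ (r : PySem.Dict String (PySem.Dict Int Int)) (t : String),
        (if (mergers.foldl (fun d m =>
            let time := PySem.Int.toStr m.1
            if d.contains time then
              d.insert time ((d.getD time PySem.Dict.empty).insert m.2.1 m.2.2)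
            else
              d.insert time (PySem.Dict.empty.insert m.2.1 m.2.2)) PySem.Dict.empty).contains t
         then r.insert t ((mergers.foldl (fun d m =>
            let time := PySem.Int.toStr m.1
            if d.contains time then
              d.insert time ((d.getD time PySem.Dict.empty).insert m.2.1 m.2.2)
            else
              d.insert time (PySem.Dict.empty.insert m.2.1 m.2.2)) PySem.Dict.empty).getD t PySem.Dict.empty)
         else r.insert t PySem.Dict.empty)
        = r.insert t (innerOf mergers t) := by
      intro r t
      rw [stepA2_eq, getD_mdFold]
    calc _ = (timesteps.foldl (fun r t => r.insert t (innerOf mergers t)) PySem.Dict.empty).items := by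
              congr 2
              funext r t
              exact hsteps r t
         _ = _ := items_foldl_insert_fun timesteps (innerOf mergers)
  rw [hA, items_bFold]
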